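-- pv_equiv track=rewrite | github.com/ryan-gang/advent-of-code | 2015/5.py | check_repeating_substring
-- ===== SOURCE A (Python) =====
-- from typing import Generator
-- from collections import Counter
--
-- def generate_consecutive_substrings(string: str, length: int) -> Generator[str, None, None]:
--     # Type hints are : Generator[yield_type, send_type, return_type]
--     for i in range(len(string) - (length - 1)):
--         yield string[i : i + length]
--
-- def check_repeating_substring(string: str) -> bool:
--     d: dict[str, int] = Counter()
--     substrings = generate_consecutive_substrings(string, length=2)
--     prev = ""
--     for substring in substrings:
--         if (substring in d and prev != substring) or d[substring] >= 2:
--             return True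
--         else:
--             prev = substring
--             d[substring] += 1
--     return False
-- ===== SOURCE B (Python) =====
-- def check_repeating_substring(string: str) -> bool:
--     for i in range(len(string) - 1):
--         if string[i : i + 2] in string[i + 2 :]:
--             return True
--     return False
-- ===== Notes on version B (the rewrite author's own statement) =====
-- stated objective: idiomatic
-- what changed: Replaced the Counter-and-previous-pair single pass over generated 2-substrings by a direct scan that tests each pair for membership in the non-overlapping suffix via substring search.
import Mathlib
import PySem

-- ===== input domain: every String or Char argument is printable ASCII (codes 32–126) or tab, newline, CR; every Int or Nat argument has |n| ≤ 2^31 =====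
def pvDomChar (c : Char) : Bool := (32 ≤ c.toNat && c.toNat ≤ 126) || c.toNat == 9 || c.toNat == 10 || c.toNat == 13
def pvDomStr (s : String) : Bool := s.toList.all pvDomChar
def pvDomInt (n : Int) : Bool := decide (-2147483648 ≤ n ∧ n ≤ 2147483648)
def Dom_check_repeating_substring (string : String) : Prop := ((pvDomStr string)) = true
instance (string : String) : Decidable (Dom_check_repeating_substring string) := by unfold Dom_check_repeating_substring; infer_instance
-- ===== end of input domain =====

-- B replaces A's Counter-based single pass with an idiomatic pair-in-suffix substring scan; return values proved equal on all strings.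

-- ===== PORT A =====
-- generate_consecutive_substrings(string, length): the yielded substrings, in order
def pvGenSubs (string : String) (length : Int) : List (List Char) :=
  (PySem.List.pyRange 0 ((PySem.Str.len string : Int) - (length - 1)) 1).map
    (fun i => PySem.Chars.slice string.toList (some i) (some (i + length)))

-- the for-loop of A, with state (prev, d); early 'return True'
def pvLoopA : List (List Char) → List Char → PySem.Dict (List Char) Int → Bool
  | [], _, _ => false
  | sub :: rest, prev, d =>
    if (PySem.Dict.contains d sub && decide (prev ≠ sub)) || decide (2 ≤ PySem.Dict.getD d sub 0) then
      true
    else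
      pvLoopA rest sub (PySem.Dict.insert d sub (PySem.Dict.getD d sub 0 + 1))

def check_repeating_substring (string : String) : Bool :=
  pvLoopA (pvGenSubs string 2) [] PySem.Dict.empty

-- ===== PORT B =====
-- B's for-loop over i in range(len(string) - 1); early 'return True'
def pvLoopB (cs : List Char) : List Int → Bool
  | [] => false
  | i :: rest =>
    if PySem.Chars.isIn (PySem.Chars.slice cs (some i) (some (i + 2)))
        (PySem.Chars.slice cs (some (i + 2)) none) then
      true
    else
      pvLoopB cs rest

def check_repeating_substring_alt (string : String) : Bool :=
  pvLoopB string.toList (PySem.List.pyRange 0 ((PySem.Str.len string : Int) - 1) 1)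

-- ===== PRECONDITION & SPEC =====
def Spec_check_repeating_substring (string : String) (out : Bool) : Prop := out = check_repeating_substring_alt string
instance (string : String) (out : Bool) : Decidable (Spec_check_repeating_substring string out) := by unfold Spec_check_repeating_substring; infer_instance

-- ===== CLAIM (what is proved, stated in full; the proofs are below) =====
def Claim_equal_check_repeating_substring : Prop := ∀ (string : String), Dom_check_repeating_substring string → Spec_check_repeating_substring string (check_repeating_substring string)

-- ===== LEMMAS AND PROOFS =====

-- the two-character window of cs starting at index k
def pvPairAt (cs : List Char) (k : Nat) : List Char := (cs.drop k).take 2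

-- the shared specification: some pair repeats at distance ≥ 2
def pvSpec (cs : List Char) : Prop :=
  ∃ k m : Nat, k + 2 ≤ cs.length ∧ k + 2 ≤ m ∧ pvPairAt cs k = pvPairAt cs m

lemma pv_prefix_iff (cs : List Char) (k m : Nat) (hk : k + 2 ≤ cs.length) :
    pvPairAt cs k <+: cs.drop m ↔ pvPairAt cs k = pvPairAt cs m := by
  rw [List.prefix_iff_eq_take]
  have h2 : (pvPairAt cs k).length = 2 := by simp [pvPairAt]; omega
  rw [h2]
  exact Iff.rfl

lemma pv_two_of_count (l : List (List Char)) (a : List Char) (h : 2 ≤ l.count a) :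
    ∃ i j, i < j ∧ j < l.length ∧ l[i]? = some a ∧ l[j]? = some a := by
  induction l with
  | nil => simp at h
  | cons b t ih =>
    by_cases hb : b = a
    · rw [hb] at h ⊢
      rw [List.count_cons_self] at h
      have hm : a ∈ t := by rw [← List.count_pos_iff]; omega
      obtain ⟨j, hj⟩ := List.mem_iff_getElem?.mp hm
      exact ⟨0, j + 1, by omega, by simpa using (List.getElem?_eq_some_iff.mp hj).1, by simp,
        by simpa using hj⟩
    · rw [List.count_cons] at h
      simp only [beq_iff_eq, hb, if_false, Nat.add_zero] at h
      obtain ⟨i, j, h1, h2, h3, h4⟩ := ih h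
      exact ⟨i + 1, j + 1, by omega, by simpa using h2, by simpa using h3, by simpa using h4⟩

lemma pv_count_of_two (l : List (List Char)) (a : List Char) (i j : Nat) (hij : i < j)
    (hi : l[i]? = some a) (hjv : l[j]? = some a) : 2 ≤ l.count a := by
  have h1 : a ∈ l.take j := by
    apply List.mem_of_getElem? (i := i)
    rw [List.getElem?_take_of_lt hij]; exact hi
  have h2 : a ∈ l.drop j := by
    apply List.mem_of_getElem? (i := 0)
    rw [List.getElem?_drop]; simpa using hjv
  have c1 : 0 < (l.take j).count a := List.count_pos_iff.mpr h1
  have c2 : 0 < (l.drop j).count a := List.count_pos_iff.mpr h2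
  calc 2 ≤ (l.take j).count a + (l.drop j).count a := by omega
    _ = (l.take j ++ l.drop j).count a := (List.count_append ..).symm
    _ = l.count a := by rw [List.take_append_drop]

lemma pvGenSubs_eq (s : String) :
    pvGenSubs s 2 = (List.range (s.toList.length - 1)).map (pvPairAt s.toList) := by
  unfold pvGenSubs
  have hlen : PySem.Str.len s = s.toList.length := by simp [PySem.Str.len_eq]
  rw [PySem.List.pyRange_one]
  have hr : ((PySem.Str.len s : Int) - (2 - 1) - 0).toNat = s.toList.length - 1 := by omega
  rw [hr, List.map_map]
  apply List.map_congr_left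
  intro k hk
  simp only [Function.comp, PySem.Chars.slice_eq_listSlice, zero_add]
  rw [PySem.List.slice_toNat _ (by omega) (by omega)]
  have h1 : ((k : Int)).toNat = k := by omega
  have h2 : ((k : Int) + 2).toNat = k + 2 := by omega
  rw [h1, h2]
  simp [pvPairAt]

-- invariant characterisation of A's loop: starting after the processed prefix `done`
-- (prev = last of done, d = Counter(done)), the loop accepts iff some still-unseen pair
-- equals an earlier pair at distance ≥ 2
lemma pvLoopA_iff (rest : List (List Char)) : ∀ done : List (List Char),
    pvLoopA rest ((done.getLast?).getD []) (PySem.Dict.counter done) = true ↔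
      ∃ j i : Nat, done.length ≤ j ∧ i + 2 ≤ j ∧ j < (done ++ rest).length ∧
        (done ++ rest)[i]? = (done ++ rest)[j]? := by
  induction rest with
  | nil =>
    intro done
    simp only [pvLoopA, List.append_nil]
    constructor
    · intro h; cases h
    · rintro ⟨j, i, h1, h2, h3, h4⟩; omega
  | cons sub rest ih =>
    intro done
    simp only [pvLoopA]
    by_cases hc : ((PySem.Dict.contains (PySem.Dict.counter done) sub
        && decide ((done.getLast?).getD [] ≠ sub))
        || decide (2 ≤ PySem.Dict.getD (PySem.Dict.counter done) sub 0)) = true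
    · rw [if_pos hc]
      simp only [true_iff]
      rcases Bool.or_eq_true_iff.mp hc with hand | hcnt
      · -- substring in d and prev != substring
        obtain ⟨hcont, hprev⟩ := Bool.and_eq_true_iff.mp hand
        rw [PySem.Dict.contains_counter] at hcont
        have hmem : sub ∈ done := by simpa using hcont
        obtain ⟨i, hi⟩ := List.mem_iff_getElem?.mp hmem
        have hilt : i < done.length := (List.getElem?_eq_some_iff.mp hi).1
        have hprev' : (done.getLast?).getD [] ≠ sub := by simpa using hprev
        have hine : i ≠ done.length - 1 := by
          intro hcon
          apply hprev'
          rw [List.getLast?_eq_getElem?, ← hcon, hi]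
          rfl
        refine ⟨done.length, i, le_rfl, by omega, by simp, ?_⟩
        rw [List.getElem?_append_left hilt, hi, List.getElem?_append_right le_rfl]
        simp
      · -- d[substring] >= 2
        have hcnt' : (2 : Int) ≤ PySem.Dict.getD (PySem.Dict.counter done) sub 0 :=
          of_decide_eq_true hcnt
        rw [PySem.Dict.getD_counter] at hcnt'
        have h2 : 2 ≤ done.count sub := by exact_mod_cast hcnt'
        obtain ⟨i, j, hij, hjlt, hi, hj⟩ := pv_two_of_count done sub h2
        refine ⟨done.length, i, le_rfl, by omega, by simp, ?_⟩
        rw [List.getElem?_append_left (by omega), hi, List.getElem?_append_right le_rfl]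
        simp
    · rw [if_neg hc]
      have hd : PySem.Dict.insert (PySem.Dict.counter done) sub
          (PySem.Dict.getD (PySem.Dict.counter done) sub 0 + 1)
          = PySem.Dict.counter (done ++ [sub]) := by
        rw [PySem.Dict.counter_append_singleton]
        rfl
      have hp : (((done ++ [sub]).getLast?).getD []) = sub := by simp
      have key := ih (done ++ [sub])
      rw [hp] at key
      rw [hd, key]
      have hL : (done ++ [sub]) ++ rest = done ++ sub :: rest := by simp
      rw [hL]
      simp only [List.length_append, List.length_singleton]
      constructor
      · rintro ⟨j, i, h1, h2, h3, h4⟩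
        exact ⟨j, i, by omega, h2, h3, h4⟩
      · rintro ⟨j, i, h1, h2, h3, h4⟩
        rcases Nat.lt_or_ge j (done.length + 1) with hj | hj
        · -- j = done.length: show the condition would have fired, contradiction
          exfalso
          have hjeq : j = done.length := by omega
          subst hjeq
          have hjval : (done ++ sub :: rest)[done.length]? = some sub := by
            rw [List.getElem?_append_right le_rfl]; simp
          have hival : done[i]? = some sub := by
            rw [← List.getElem?_append_left (l₂ := sub :: rest) (by omega), h4, hjval]
          have hmem : sub ∈ done := List.mem_of_getElem? hival
          have hcont : PySem.Dict.contains (PySem.Dict.counter done) sub = true := by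
            rw [PySem.Dict.contains_counter]; simpa using hmem
          have hc' : ((PySem.Dict.counter done).contains sub = true →
              (done.getLast?).getD [] = sub) ∧ List.count sub done ≤ 1 := by
            simpa using hc
          have hprev : (done.getLast?).getD [] = sub := hc'.1 hcont
          have hlast : done[done.length - 1]? = some sub := by
            rw [← List.getLast?_eq_getElem?]
            cases hgl : done.getLast? with
            | none => simp [List.getLast?_eq_none_iff] at hgl; subst hgl; simp at hival
            | some x => rw [hgl] at hprev; simp at hprev; rw [hprev]
          have hcount : 2 ≤ done.count sub :=
            pv_count_of_two done sub i (done.length - 1) (by omega) hival hlast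
          have hcount' : List.count sub done = done.count sub := rfl
          omega
        · exact ⟨j, i, hj, h2, h3, h4⟩

lemma pv_len_of_eq (cs : List Char) (k m : Nat) (hk : k + 2 ≤ cs.length)
    (h : pvPairAt cs k = pvPairAt cs m) : m + 2 ≤ cs.length := by
  have h1 : (pvPairAt cs k).length = 2 := by
    simp only [pvPairAt, List.length_take, List.length_drop]
    omega
  have h2 : (pvPairAt cs m).length ≤ cs.length - m := by
    simp only [pvPairAt, List.length_take, List.length_drop]
    omega
  rw [h] at h1
  omega

lemma pvA_iff' (cs : List Char) :
    (∃ j i : Nat, i + 2 ≤ j ∧ j < ((List.range (cs.length - 1)).map (pvPairAt cs)).length ∧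
      ((List.range (cs.length - 1)).map (pvPairAt cs))[i]? =
        ((List.range (cs.length - 1)).map (pvPairAt cs))[j]?) ↔ pvSpec cs := by
  simp only [List.length_map, List.length_range, List.getElem?_map]
  constructor
  · rintro ⟨j, i, hij, hjlt, heq⟩
    rw [List.getElem?_range (by omega), List.getElem?_range (by omega)] at heq
    simp only [Option.map_some] at heq
    exact ⟨i, j, by omega, hij, Option.some_injective _ heq⟩
  · rintro ⟨k, m, hk2, hkm, heq⟩
    have hmlen : m + 2 ≤ cs.length := pv_len_of_eq cs k m hk2 heq
    refine ⟨m, k, hkm, by omega, ?_⟩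
    rw [List.getElem?_range (by omega), List.getElem?_range (by omega)]
    simp [heq]

lemma pvA_iff (s : String) : check_repeating_substring s = true ↔ pvSpec s.toList := by
  have h0 := pvLoopA_iff (pvGenSubs s 2) []
  simp only [List.nil_append, List.length_nil, Nat.zero_le, true_and, List.getLast?_nil,
    Option.getD_none] at h0
  unfold check_repeating_substring
  rw [show (PySem.Dict.empty : PySem.Dict (List Char) Int) = PySem.Dict.counter [] from rfl, h0,
    pvGenSubs_eq]
  exact pvA_iff' s.toList

lemma pvLoopB_any (cs : List Char) (l : List Int) :
    pvLoopB cs l = true ↔ ∃ i ∈ l,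
      PySem.Chars.isIn (PySem.Chars.slice cs (some i) (some (i + 2)))
        (PySem.Chars.slice cs (some (i + 2)) none) = true := by
  induction l with
  | nil => simp [pvLoopB]
  | cons i rest ih =>
    by_cases h : PySem.Chars.isIn (PySem.Chars.slice cs (some i) (some (i + 2)))
        (PySem.Chars.slice cs (some (i + 2)) none) = true
    · simp only [pvLoopB, if_pos h, true_iff]
      exact ⟨i, by simp, h⟩
    · simp only [pvLoopB, if_neg h, ih, List.mem_cons]
      constructor
      · rintro ⟨x, hx, hIn⟩; exact ⟨x, Or.inr hx, hIn⟩
      · rintro ⟨x, hx | hx, hIn⟩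
        · rw [hx] at hIn; exact absurd hIn h
        · exact ⟨x, hx, hIn⟩

lemma pv_sliceB_pair (cs : List Char) (k : Nat) :
    PySem.Chars.slice cs (some (k : Int)) (some ((k : Int) + 2)) = pvPairAt cs k := by
  simp only [PySem.Chars.slice_eq_listSlice]
  rw [PySem.List.slice_toNat _ (by omega) (by omega)]
  have h1 : ((k : Int)).toNat = k := by omega
  have h2 : ((k : Int) + 2).toNat = k + 2 := by omega
  rw [h1, h2]
  simp [pvPairAt]

lemma pv_sliceB_suffix (cs : List Char) (k : Nat) :
    PySem.Chars.slice cs (some ((k : Int) + 2)) none = cs.drop (k + 2) := by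
  simp only [PySem.Chars.slice_eq_listSlice]
  have h : ((k : Int) + 2).toNat = k + 2 := by omega
  rw [PySem.List.slice_from _ (by omega), h]

lemma pvB_iff (s : String) : check_repeating_substring_alt s = true ↔ pvSpec s.toList := by
  unfold check_repeating_substring_alt
  rw [pvLoopB_any]
  have hlen : PySem.Str.len s = s.toList.length := by simp [PySem.Str.len_eq]
  constructor
  · rintro ⟨i, hmem, hIn⟩
    rw [PySem.List.mem_pyRange_one] at hmem
    obtain ⟨h0, h1⟩ := hmem
    have hik : i = ((i.toNat : Nat) : Int) := by omega
    rw [hik, pv_sliceB_pair, pv_sliceB_suffix] at hIn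
    have hk2 : i.toNat + 2 ≤ s.toList.length := by omega
    rw [← PySem.Chars.exists_prefix_drop_iff_isIn] at hIn
    obtain ⟨j, hpre⟩ := hIn
    rw [List.drop_drop, pv_prefix_iff _ _ _ hk2] at hpre
    exact ⟨i.toNat, i.toNat + 2 + j, hk2, by omega, hpre⟩
  · rintro ⟨k, m, hk2, hkm, heq⟩
    refine ⟨(k : Nat), ?_, ?_⟩
    · rw [PySem.List.mem_pyRange_one]
      omega
    · rw [pv_sliceB_pair, pv_sliceB_suffix, ← PySem.Chars.exists_prefix_drop_iff_isIn]
      refine ⟨m - (k + 2), ?_⟩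
      rw [List.drop_drop, pv_prefix_iff _ _ _ hk2]
      have hm : k + 2 + (m - (k + 2)) = m := by omega
      rw [hm]
      exact heq

-- ===== VERDICT (by name: the statement is the Claim_ definition above) =====
theorem check_repeating_substring_spec : Claim_equal_check_repeating_substring := by
  intro s _
  unfold Spec_check_repeating_substring
  have h := (pvA_iff s).trans (pvB_iff s).symm
  cases hA : check_repeating_substring s <;> cases hB : check_repeating_substring_alt s <;>
    simp_all
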